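-- pv_equiv track=rewrite | github.com/Bralor/google-drive-uploader | src/status_parser.py | sort_status
-- ===== SOURCE A (Python) =====
-- def sort_status(source: list, status: dict = None) -> dict:
--     if status is None:
--         status = {
--             "headline": [],
--             "traced": [],
--             "untraced": []
--         }
--
--     for line in source:
--         if line.startswith("##"):
--             status["headline"].append(line.split(maxsplit=1)[1])
--         elif line.startswith("M"):
--             status["traced"].append(line.split(maxsplit=1)[1])
--         elif line.startswith("??"):
--             status["untraced"].append(line.split(maxsplit=1)[1])
--
--     return status
-- ===== SOURCE B (Python) =====
-- def sort_status(source: list, status: dict = None) -> dict: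
--     if status is None:
--         status = {
--             "headline": [],
--             "traced": [],
--             "untraced": []
--         }
--
--     for key, prefix in (("headline", "##"), ("traced", "M"), ("untraced", "??")):
--         tails = [line.split(maxsplit=1)[1] for line in source if line.startswith(prefix)]
--         if tails:
--             status[key].extend(tails)
--
--     return status
-- ===== Notes on version B (the rewrite author's own statement) =====
-- stated objective: alternative
-- what changed: A's single interleaved for-loop classifying each line with an if/elif chain is replaced by a loop over the three (key, prefix) categories, each building its additions with one filter-and-map pass over source and extending that key's list in one shot (skipped when empty).
import Mathlib
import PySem

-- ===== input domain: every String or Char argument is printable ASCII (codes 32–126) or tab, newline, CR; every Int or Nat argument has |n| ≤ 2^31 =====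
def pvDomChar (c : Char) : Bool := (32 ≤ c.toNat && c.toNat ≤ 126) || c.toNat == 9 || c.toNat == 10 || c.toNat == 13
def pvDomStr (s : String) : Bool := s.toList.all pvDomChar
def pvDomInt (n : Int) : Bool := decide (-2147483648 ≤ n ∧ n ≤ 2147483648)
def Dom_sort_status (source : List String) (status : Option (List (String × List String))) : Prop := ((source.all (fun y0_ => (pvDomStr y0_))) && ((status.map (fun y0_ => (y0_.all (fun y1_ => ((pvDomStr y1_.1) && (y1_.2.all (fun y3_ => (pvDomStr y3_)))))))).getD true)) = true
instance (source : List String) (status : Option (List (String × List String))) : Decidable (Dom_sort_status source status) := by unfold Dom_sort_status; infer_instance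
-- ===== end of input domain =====

-- B replaces A's single interleaved classifying loop by three per-category filter passes
-- (objective: alternative decomposition, same cost). Both A and B mutate the passed dict in
-- place in Python; the equivalence proved here is about the RETURN value only.

-- shared literal: the default dict built when status is None (used by both ports and Pre_)
def pvDefaultStatus : List (String × List String) :=
  [("headline", []), ("traced", []), ("untraced", [])]

-- line.split(maxsplit=1)[1]; Python raises IndexError when there is no second piece
-- (those inputs are excluded by Pre_; the default "" is never the claimed value)
def pvTail (line : String) : String :=
  PySem.List.pyGetD (PySem.Str.split₀Max line 1) 1 ""

-- ===== PORT A =====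
-- the body of A's for-loop: the if/elif/elif chain on one line
def pvStepA (d : PySem.Dict String (List String)) (line : String) : PySem.Dict String (List String) :=
  if PySem.Str.startswith line "##" then d.modify "headline" [] (· ++ [pvTail line])
  else if PySem.Str.startswith line "M" then d.modify "traced" [] (· ++ [pvTail line])
  else if PySem.Str.startswith line "??" then d.modify "untraced" [] (· ++ [pvTail line])
  else d

def sort_status (source : List String) (status : Option (List (String × List String))) : List (String × List String) :=
  (source.foldl pvStepA (PySem.Dict.mk (status.getD pvDefaultStatus))).items

-- ===== PORT B =====
-- [line.split(maxsplit=1)[1] for line in source if line.startswith(pfx)]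
def pvTails (source : List String) (pfx : String) : List String :=
  (source.filter (fun line => PySem.Str.startswith line pfx)).map pvTail

-- one pass of B's loop body: 'tails = [...]; if tails: status[key].extend(tails)'
def pvPass (t : List String) (key : String) (d : PySem.Dict String (List String)) :
    PySem.Dict String (List String) :=
  if t = [] then d else d.modify key [] (· ++ t)

def sort_status_alt (source : List String) (status : Option (List (String × List String))) : List (String × List String) :=
  ([("headline", "##"), ("traced", "M"), ("untraced", "??")].foldl
    (fun d kp => pvPass (pvTails source kp.2) kp.1 d)
    (PySem.Dict.mk (status.getD pvDefaultStatus))).items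

-- ===== PRECONDITION & SPEC =====
-- Pre_ excludes exactly the inputs on which A raises: a classified line whose category key is
-- missing from the provided status dict (KeyError) or which has no second whitespace-separated
-- piece (IndexError).
def Pre_sort_status (source : List String) (status : Option (List (String × List String))) : Prop :=
  ∀ line ∈ source,
    (PySem.Str.startswith line "##" = true →
      "headline" ∈ (status.getD pvDefaultStatus).map (·.1) ∧
      2 ≤ (PySem.Str.split₀Max line 1).length) ∧
    (PySem.Str.startswith line "M" = true →
      "traced" ∈ (status.getD pvDefaultStatus).map (·.1) ∧
      2 ≤ (PySem.Str.split₀Max line 1).length) ∧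
    (PySem.Str.startswith line "??" = true →
      "untraced" ∈ (status.getD pvDefaultStatus).map (·.1) ∧
      2 ≤ (PySem.Str.split₀Max line 1).length)
instance (source : List String) (status : Option (List (String × List String))) : Decidable (Pre_sort_status source status) := by unfold Pre_sort_status; infer_instance

def pvWitness_sort_status : List String × (Option (List (String × List String))) :=
  (["## main...origin/main", "M  src/a.py", "?? notes.txt", "A  new.py"], none)

def Spec_sort_status (source : List String) (status : Option (List (String × List String))) (out : List (String × List String)) : Prop := out = sort_status_alt source status
instance (source : List String) (status : Option (List (String × List String))) (out : List (String × List String)) : Decidable (Spec_sort_status source status out) := by unfold Spec_sort_status; infer_instance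

-- ===== CLAIM (what is proved, stated in full; the proofs are below) =====
def Claim_equal_sort_status : Prop := ∀ (source : List String) (status : Option (List (String × List String))), Dom_sort_status source status → Pre_sort_status source status → Spec_sort_status source status (sort_status source status)

-- ===== LEMMAS AND PROOFS =====

-- a line starting with one prefix character cannot start with a different one
theorem pv_ssw_disj (l : String) (a b : Char) (pa pb : List Char) (hne : (b == a) = false)
    (h : PySem.Chars.startswith l.toList (a :: pa) = true) :
    PySem.Chars.startswith l.toList (b :: pb) = false := by
  cases hl : l.toList with
  | nil => rw [hl] at h; simp [PySem.Chars.startswith, List.isPrefixOf] at h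
  | cons x t =>
    rw [hl] at h
    simp only [PySem.Chars.startswith, List.isPrefixOf, Bool.and_eq_true, beq_iff_eq] at h
    simp only [PySem.Chars.startswith, List.isPrefixOf, Bool.and_eq_false_iff]
    left
    rw [← h.1]
    exact hne

theorem pv_hash_not_M (l : String) (h : PySem.Str.startswith l "##" = true) :
    PySem.Str.startswith l "M" = false :=
  pv_ssw_disj l '#' 'M' ['#'] [] (by decide) h

theorem pv_hash_not_q (l : String) (h : PySem.Str.startswith l "##" = true) :
    PySem.Str.startswith l "??" = false :=
  pv_ssw_disj l '#' '?' ['#'] ['?'] (by decide) h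

theorem pv_M_not_q (l : String) (h : PySem.Str.startswith l "M" = true) :
    PySem.Str.startswith l "??" = false :=
  pv_ssw_disj l 'M' '?' [] ['?'] (by decide) h

theorem pvTails_cons_pos (l : String) (rest : List String) (p : String)
    (h : PySem.Str.startswith l p = true) :
    pvTails (l :: rest) p = pvTail l :: pvTails rest p := by
  have h' : PySem.Chars.startswith l.toList p.toList = true := h
  simp [pvTails, h']

theorem pvTails_cons_neg (l : String) (rest : List String) (p : String)
    (h : PySem.Str.startswith l p = false) :
    pvTails (l :: rest) p = pvTails rest p := by
  have h' : PySem.Chars.startswith l.toList p.toList = false := h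
  simp [pvTails, h']

-- two inserts at distinct keys that are both already present commute (both just map in place)
theorem pv_insert_comm {ν : Type} (d : PySem.Dict String ν) (k1 k2 : String) (v1 v2 : ν)
    (h1 : d.contains k1 = true) (h2 : d.contains k2 = true) (hne : k1 ≠ k2) :
    (d.insert k1 v1).insert k2 v2 = (d.insert k2 v2).insert k1 v1 := by
  apply PySem.Dict.ext
  have c2 : (d.insert k1 v1).contains k2 = true := by
    simp [PySem.Dict.contains_insert, h2]
  have c1 : (d.insert k2 v2).contains k1 = true := by
    simp [PySem.Dict.contains_insert, h1]
  rw [PySem.Dict.items_insert_of_contains _ _ c2, PySem.Dict.items_insert_of_contains _ _ h1,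
      PySem.Dict.items_insert_of_contains _ _ c1, PySem.Dict.items_insert_of_contains _ _ h2,
      List.map_map, List.map_map]
  apply List.map_congr_left
  intro p _
  by_cases e1 : p.1 = k1 <;> by_cases e2 : p.1 = k2 <;>
    simp [Function.comp, e1, e2, hne, Ne.symm hne]

theorem pv_modify_comm {ν : Type} (d : PySem.Dict String ν) (k1 k2 : String) (d0 : ν)
    (f g : ν → ν) (h1 : d.contains k1 = true) (h2 : d.contains k2 = true) (hne : k1 ≠ k2) :
    (d.modify k1 d0 f).modify k2 d0 g = (d.modify k2 d0 g).modify k1 d0 f := by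
  simp only [PySem.Dict.modify]
  rw [PySem.Dict.getD_insert_of_ne _ _ _ (Ne.symm hne), PySem.Dict.getD_insert_of_ne _ _ _ hne]
  exact pv_insert_comm d k1 k2 _ _ h1 h2 hne

theorem pv_modify_modify {ν : Type} (d : PySem.Dict String ν) (k : String) (d0 : ν)
    (f g : ν → ν) :
    (d.modify k d0 f).modify k d0 g = d.modify k d0 (fun v => g (f v)) := by
  simp [PySem.Dict.modify, PySem.Dict.getD_insert_self, PySem.Dict.insert_insert_self]

-- a guarded pass at key k1 moves past a modify at a different contained key
theorem pvPass_modify_comm (d : PySem.Dict String (List String)) (t : List String)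
    (k1 k2 : String) (f : List String → List String) (hne : k1 ≠ k2)
    (h1 : t ≠ [] → d.contains k1 = true) (h2 : d.contains k2 = true) :
    pvPass t k1 (d.modify k2 [] f) = (pvPass t k1 d).modify k2 [] f := by
  by_cases h : t = []
  · simp [pvPass, h]
  · simp only [pvPass, if_neg h]
    exact pv_modify_comm d k2 k1 [] f _ h2 (h1 h) (Ne.symm hne)

-- appending one tail and then a guarded pass with the remaining tails is one combined modify
theorem pvPass_snoc (d : PySem.Dict String (List String)) (t : String) (T : List String)
    (k : String) :
    pvPass T k (d.modify k [] (· ++ [t])) = d.modify k [] (· ++ t :: T) := by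
  by_cases h : T = []
  · simp [pvPass, h]
  · rw [pvPass, if_neg h, pv_modify_modify]
    have hf : (fun v => v ++ [t] ++ T) = (fun v : List String => v ++ t :: T) := by
      funext v; simp
    rw [hf]

-- a nonempty guarded pass is the modify
theorem pvPass_ne (d : PySem.Dict String (List String)) (t : String) (T : List String)
    (k : String) : pvPass (t :: T) k d = d.modify k [] (· ++ t :: T) := by
  simp [pvPass]

-- the interleaved loop of A equals B's three per-category guarded passes
theorem pv_loop (source : List String) :
    ∀ (d : PySem.Dict String (List String)),
    (pvTails source "##" ≠ [] → d.contains "headline" = true) →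
    (pvTails source "M" ≠ [] → d.contains "traced" = true) →
    (pvTails source "??" ≠ [] → d.contains "untraced" = true) →
    source.foldl pvStepA d =
      pvPass (pvTails source "??") "untraced"
        (pvPass (pvTails source "M") "traced"
          (pvPass (pvTails source "##") "headline" d)) := by
  induction source with
  | nil =>
    intro d _ _ _
    simp [pvTails, pvPass]
  | cons l rest ih =>
    intro d hh ht hu
    rw [List.foldl_cons]
    by_cases h1 : PySem.Str.startswith l "##" = true
    · have hM := pv_hash_not_M l h1
      have hq := pv_hash_not_q l h1
      have h1c : PySem.Chars.startswith l.toList ['#', '#'] = true := h1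
      have ch : d.contains "headline" = true := by
        refine hh ?_
        rw [pvTails_cons_pos _ _ _ h1]; exact List.cons_ne_nil _ _
      rw [pvTails_cons_pos _ _ _ h1, pvTails_cons_neg _ _ _ hM, pvTails_cons_neg _ _ _ hq]
      have hstep : pvStepA d l = d.modify "headline" [] (· ++ [pvTail l]) := by
        simp [pvStepA, h1c]
      rw [hstep, ih _ ?ch ?ct ?cu]
      · rw [pvPass_snoc, pvPass_ne]
      case ch => intro _; simp [PySem.Dict.contains_modify]
      case ct =>
        intro hne
        have := ht (by rw [pvTails_cons_neg _ _ _ hM]; exact hne)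
        simp [PySem.Dict.contains_modify, this]
      case cu =>
        intro hne
        have := hu (by rw [pvTails_cons_neg _ _ _ hq]; exact hne)
        simp [PySem.Dict.contains_modify, this]
    · by_cases h2 : PySem.Str.startswith l "M" = true
      · have hq := pv_M_not_q l h2
        have h1c : PySem.Chars.startswith l.toList ['#', '#'] = false := eq_false_of_ne_true h1
        have h2c : PySem.Chars.startswith l.toList ['M'] = true := h2
        have ct : d.contains "traced" = true := by
          refine ht ?_
          rw [pvTails_cons_pos _ _ _ h2]; exact List.cons_ne_nil _ _
        rw [pvTails_cons_neg _ _ _ (eq_false_of_ne_true h1), pvTails_cons_pos _ _ _ h2,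
            pvTails_cons_neg _ _ _ hq]
        have hstep : pvStepA d l = d.modify "traced" [] (· ++ [pvTail l]) := by
          simp [pvStepA, h1c, h2c]
        rw [hstep, ih _ ?ch ?ct ?cu]
        · rw [pvPass_modify_comm _ _ _ _ _ (by decide)
                (fun hne => hh (by rw [pvTails_cons_neg _ _ _ (eq_false_of_ne_true h1)]; exact hne))
                ct,
              pvPass_snoc, pvPass_ne]
        case ch =>
          intro hne
          have := hh (by rw [pvTails_cons_neg _ _ _ (eq_false_of_ne_true h1)]; exact hne)
          simp [PySem.Dict.contains_modify, this]
        case ct => intro _; simp [PySem.Dict.contains_modify]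
        case cu =>
          intro hne
          have := hu (by rw [pvTails_cons_neg _ _ _ hq]; exact hne)
          simp [PySem.Dict.contains_modify, this]
      · by_cases h3 : PySem.Str.startswith l "??" = true
        · have h1c : PySem.Chars.startswith l.toList ['#', '#'] = false := eq_false_of_ne_true h1
          have h2c : PySem.Chars.startswith l.toList ['M'] = false := eq_false_of_ne_true h2
          have h3c : PySem.Chars.startswith l.toList ['?', '?'] = true := h3
          have cu : d.contains "untraced" = true := by
            refine hu ?_
            rw [pvTails_cons_pos _ _ _ h3]; exact List.cons_ne_nil _ _
          rw [pvTails_cons_neg _ _ _ (eq_false_of_ne_true h1),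
              pvTails_cons_neg _ _ _ (eq_false_of_ne_true h2), pvTails_cons_pos _ _ _ h3]
          have hstep : pvStepA d l = d.modify "untraced" [] (· ++ [pvTail l]) := by
            simp [pvStepA, h1c, h2c, h3c]
          rw [hstep, ih _ ?ch ?ct ?cu]
          · rw [pvPass_modify_comm _ _ _ _ _ (by decide)
                  (fun hne => hh (by rw [pvTails_cons_neg _ _ _ (eq_false_of_ne_true h1)]; exact hne))
                  cu,
                pvPass_modify_comm _ _ _ _ _ (by decide)
                  (fun hne => by
                    have := ht (by rw [pvTails_cons_neg _ _ _ (eq_false_of_ne_true h2)]; exact hne)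
                    simp [pvPass]
                    by_cases he : pvTails rest "##" = [] <;>
                      simp [he, PySem.Dict.contains_modify, this])
                  (by simp [pvPass]
                      by_cases he : pvTails rest "##" = [] <;>
                        simp [he, PySem.Dict.contains_modify, cu]),
                pvPass_snoc, pvPass_ne]
          case ch =>
            intro hne
            have := hh (by rw [pvTails_cons_neg _ _ _ (eq_false_of_ne_true h1)]; exact hne)
            simp [PySem.Dict.contains_modify, this]
          case ct =>
            intro hne
            have := ht (by rw [pvTails_cons_neg _ _ _ (eq_false_of_ne_true h2)]; exact hne)
            simp [PySem.Dict.contains_modify, this]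
          case cu => intro _; simp [PySem.Dict.contains_modify]
        · have h1c : PySem.Chars.startswith l.toList ['#', '#'] = false := eq_false_of_ne_true h1
          have h2c : PySem.Chars.startswith l.toList ['M'] = false := eq_false_of_ne_true h2
          have h3c : PySem.Chars.startswith l.toList ['?', '?'] = false := eq_false_of_ne_true h3
          rw [pvTails_cons_neg _ _ _ (eq_false_of_ne_true h1),
              pvTails_cons_neg _ _ _ (eq_false_of_ne_true h2),
              pvTails_cons_neg _ _ _ (eq_false_of_ne_true h3)]
          have hstep : pvStepA d l = d := by simp [pvStepA, h1c, h2c, h3c]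
          rw [hstep,
              ih _ (fun hne => hh (by rw [pvTails_cons_neg _ _ _ (eq_false_of_ne_true h1)]; exact hne))
                (fun hne => ht (by rw [pvTails_cons_neg _ _ _ (eq_false_of_ne_true h2)]; exact hne))
                (fun hne => hu (by rw [pvTails_cons_neg _ _ _ (eq_false_of_ne_true h3)]; exact hne))]

-- a nonempty tails list exhibits a line with that prefix
theorem pvTails_ne_imp (source : List String) (p : String) (h : pvTails source p ≠ []) :
    ∃ line ∈ source, PySem.Str.startswith line p = true := by
  simp only [pvTails, ne_eq, List.map_eq_nil_iff, List.filter_eq_nil_iff, not_forall] at h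
  obtain ⟨line, hmem, hsw⟩ := h
  exact ⟨line, hmem, by simpa using hsw⟩

-- ===== VERDICT (by name: the statement is the Claim_ definition above) =====
theorem sort_status_spec : Claim_equal_sort_status := by
  intro source status _hdom hpre
  unfold Spec_sort_status sort_status sort_status_alt
  simp only [List.foldl_cons, List.foldl_nil]
  have key_of : ∀ (k : String), k ∈ (status.getD pvDefaultStatus).map (·.1) →
      (PySem.Dict.mk (status.getD pvDefaultStatus)).contains k = true := by
    intro k hk
    rw [PySem.Dict.contains_iff_mem_keys, PySem.Dict.keys_mk]; exact hk
  rw [pv_loop source _ ?ch ?ct ?cu]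
  case ch =>
    intro hne
    obtain ⟨line, hmem, hsw⟩ := pvTails_ne_imp _ _ hne
    exact key_of _ ((hpre line hmem).1 hsw).1
  case ct =>
    intro hne
    obtain ⟨line, hmem, hsw⟩ := pvTails_ne_imp _ _ hne
    exact key_of _ ((hpre line hmem).2.1 hsw).1
  case cu =>
    intro hne
    obtain ⟨line, hmem, hsw⟩ := pvTails_ne_imp _ _ hne
    exact key_of _ ((hpre line hmem).2.2 hsw).1
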